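-- pv_equiv track=rewrite | github.com/flounderK/AdventOfCode2018 | Day15/Day15.py | prioritize_path
-- ===== SOURCE A (Python) =====
-- def prioritize_path(paths: list):
--     divergent_ind = None
--     divergent_path_ind = None
--     for ind, locs in enumerate(zip(*paths)):
--         default_loc_for_ind = locs[0]
--         for loc in locs:
--             if loc != default_loc_for_ind:
--                 # find the first index where there are differing locations
--                 divergent_ind = ind
--                 break
--         if divergent_ind is not None:
--             # choose the first of the locations in reading order
--             # vv this right here decides reading order, change if broken vv
--             optimal_location_at_divergence = sorted(list(locs), key=lambda a: (a[1], a[0]))[0]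
--             number_of_remaining_paths = len([i for i in list(locs) if i == optimal_location_at_divergence])
--             optimal_paths = [p for i, p in enumerate(paths) if paths[i][ind] == optimal_location_at_divergence]
--             if number_of_remaining_paths == 1:
--                 return optimal_paths[0]
--             else:
--                 # recursively call this function until only one path remains
--                 return prioritize_path(optimal_paths)
-- ===== SOURCE B (Python) =====
-- def prioritize_path(paths: list):
--     # single forward pass: keep the surviving paths and advance one index at a
--     # time instead of recursing and rescanning from index 0
--     if not paths:
--         return None
--     survivors = paths
--     m = min(len(p) for p in survivors)
--     i = 0
--     while i < m:
--         first = survivors[0][i]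
--         if any(p[i] != first for p in survivors):
--             best = min((p[i] for p in survivors), key=lambda a: (a[1], a[0]))
--             survivors = [p for p in survivors if p[i] == best]
--             if len(survivors) == 1:
--                 return survivors[0]
--             m = min(len(p) for p in survivors)
--         i += 1
--     return None
-- ===== Notes on version B (the rewrite author's own statement) =====
-- stated objective: faster
-- what changed: B replaces A's recursion (which re-zips and rescans the shared prefix from index 0 on every narrowing) with one forward pass over the indices that filters a surviving-paths list as it goes, and replaces the full sort at each divergence by a single min scan
import Mathlib
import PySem

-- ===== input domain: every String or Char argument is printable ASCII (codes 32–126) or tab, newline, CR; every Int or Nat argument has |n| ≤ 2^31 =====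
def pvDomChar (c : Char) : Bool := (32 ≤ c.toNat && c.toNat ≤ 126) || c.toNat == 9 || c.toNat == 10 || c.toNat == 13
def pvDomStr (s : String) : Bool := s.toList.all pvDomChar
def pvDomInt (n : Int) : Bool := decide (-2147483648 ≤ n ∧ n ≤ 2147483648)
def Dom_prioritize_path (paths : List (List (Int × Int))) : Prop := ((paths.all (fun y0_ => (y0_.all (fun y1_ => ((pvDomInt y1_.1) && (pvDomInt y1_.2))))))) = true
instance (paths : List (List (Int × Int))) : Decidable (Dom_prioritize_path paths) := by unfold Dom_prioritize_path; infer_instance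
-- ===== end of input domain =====

-- B replaces A's recursion (which rescans from index 0 after each narrowing) by a single forward
-- pass that filters a surviving-paths list, and the sort at each divergence by one min scan.

-- shared helpers: min/max path length (pvMinLen = length of zip(*paths)) and the row of
-- locations at index i (the tuple 'locs' of the Pythons)
def pvMinLen (paths : List (List (Int × Int))) : Nat :=
  match paths.map List.length with
  | [] => 0
  | l :: ls => ls.foldl min l

def pvMaxLen (paths : List (List (Int × Int))) : Nat :=
  (paths.map List.length).foldl max 0

def pvRow (paths : List (List (Int × Int))) (i : Nat) : List (Int × Int) :=
  paths.map (fun p => p.getD i (0, 0))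

-- ===== PORT A =====
-- A recurses on a strictly smaller list of paths, so fuel = paths.length bounds the recursion
-- depth and the fuel-0 branch coincides with A (it is only reached with an empty list).
-- 'for ind, locs in enumerate(zip(*paths))' with the break is the find? of the first divergent
-- index; 'sorted(...)[0]' is headD (the row is nonempty there, so [0] never raises).
def prioritize_path_go : Nat → List (List (Int × Int)) → Option (List (Int × Int))
  | 0, _ => none
  | fuel + 1, paths =>
    match (List.range (pvMinLen paths)).find?
        (fun ind => (pvRow paths ind).any (fun l => l != (pvRow paths ind).headD (0, 0))) with
    | none => none
    | some ind =>
      let locs := pvRow paths ind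
      let optimal := (PySem.List.sorted2 locs (fun a => a.2) (fun a => a.1)).headD (0, 0)
      let cnt := locs.count optimal
      let optimal_paths := paths.filter (fun p => p.getD ind (0, 0) == optimal)
      if cnt = 1 then optimal_paths.head?
      else prioritize_path_go fuel optimal_paths

def prioritize_path (paths : List (List (Int × Int))) : Option (List (Int × Int)) :=
  prioritize_path_go paths.length paths

-- ===== PORT B =====
-- the while-loop of Source B; i only grows and stays below the min length of the survivors, which
-- never exceeds the initial max path length, so fuel = pvMaxLen bounds the iterations and the
-- fuel-0 branch coincides with Source B's 'i >= m' exit.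
def prioritize_path_alt_go : List (List (Int × Int)) → Nat → Nat → Option (List (Int × Int))
  | _, _, 0 => none
  | survivors, i, fuel + 1 =>
    if i < pvMinLen survivors then
      let first := (survivors.headD []).getD i (0, 0)
      if survivors.any (fun p => p.getD i (0, 0) != first) then
        let best := (PySem.List.min2? (pvRow survivors i) (fun a => a.2) (fun a => a.1)).getD (0, 0)
        let survivors' := survivors.filter (fun p => p.getD i (0, 0) == best)
        if survivors'.length = 1 then survivors'.head?
        else prioritize_path_alt_go survivors' (i + 1) fuel
      else prioritize_path_alt_go survivors (i + 1) fuel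
    else none

def prioritize_path_alt (paths : List (List (Int × Int))) : Option (List (Int × Int)) :=
  if paths = [] then none else prioritize_path_alt_go paths 0 (pvMaxLen paths)

-- ===== PRECONDITION & SPEC =====
def Spec_prioritize_path (paths : List (List (Int × Int))) (out : Option (List (Int × Int))) : Prop := out = prioritize_path_alt paths
instance (paths : List (List (Int × Int))) (out : Option (List (Int × Int))) : Decidable (Spec_prioritize_path paths out) := by unfold Spec_prioritize_path; infer_instance

-- ===== CLAIM (what is proved, stated in full; the proofs are below) =====
def Claim_equal_prioritize_path : Prop := ∀ (paths : List (List (Int × Int))), Dom_prioritize_path paths → Spec_prioritize_path paths (prioritize_path paths)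

-- ===== LEMMAS AND PROOFS =====

def pvAllEq (s : List (List (Int × Int))) (j : Nat) : Prop :=
  ∀ p ∈ s, ∀ q ∈ s, p.getD j (0, 0) = q.getD j (0, 0)

theorem head?_insertBy {α : Type} (before : α → α → Bool) (x : α) (l : List α) :
    (PySem.List.insertBy before x l).head? =
      (match l.head? with
       | none => some x
       | some m => if before x m then some x else some m) := by
  cases l with
  | nil => simp [PySem.List.insertBy]
  | cons h t => by_cases hb : before x h <;> simp [PySem.List.insertBy, hb]

theorem head?_foldl_insertBy {α : Type} (before : α → α → Bool) (xs : List α) (acc : List α) :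
    (xs.foldl (fun acc x => PySem.List.insertBy before x acc) acc).head? =
      xs.foldl (fun m x =>
        match m with
        | none => some x
        | some m => if before x m then some x else some m) acc.head? := by
  induction xs generalizing acc with
  | nil => rfl
  | cons y ys ih =>
    simp only [List.foldl_cons]
    rw [ih, head?_insertBy]

theorem sorted2_head?_eq_min2? (xs : List (Int × Int)) :
    (PySem.List.sorted2 xs (fun a => a.2) (fun a => a.1)).head? =
      PySem.List.min2? xs (fun a => a.2) (fun a => a.1) := by
  simp only [PySem.List.sorted2, PySem.List.min2?]
  exact head?_foldl_insertBy _ xs []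

theorem count_map_eq_length_filter {α β : Type} [BEq β] [LawfulBEq β] (f : α → β) (v : β) (l : List α) :
    (l.map f).count v = (l.filter (fun x => f x == v)).length := by
  induction l with
  | nil => rfl
  | cons a t ih =>
    by_cases h : f a = v <;> simp [h, ih]

theorem find?_range_eq_some {P : Nat → Bool} {m i : Nat} (hi : i < m) (hP : P i = true)
    (hmin : ∀ j, j < i → P j = false) : (List.range m).find? P = some i := by
  induction m with
  | zero => omega
  | succ n ih =>
    rw [List.range_succ, List.find?_append]
    rcases Nat.lt_or_ge i n with h | h
    · rw [ih h]; rfl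
    · have hie : i = n := by omega
      have hnone : (List.range n).find? P = none := by
        rw [List.find?_eq_none]
        intro x hx
        have hx' := List.mem_range.mp hx
        simp [hmin x (by omega)]
      rw [hnone]
      have hPn : P n = true := hie ▸ hP
      simp [List.find?, hPn, hie]

theorem foldl_min_le_nat (t : List Nat) (a : Nat) :
    t.foldl min a ≤ a ∧ ∀ y ∈ t, t.foldl min a ≤ y := by
  induction t generalizing a with
  | nil => simp
  | cons b t ih =>
    refine ⟨le_trans (ih (min a b)).1 (by omega), ?_⟩
    intro y hy
    rcases List.mem_cons.mp hy with rfl | hy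
    · exact le_trans (ih (min a y)).1 (by omega)
    · exact (ih (min a b)).2 y hy

theorem pvMinLen_le {paths : List (List (Int × Int))} {p : List (Int × Int)} (hp : p ∈ paths) :
    pvMinLen paths ≤ p.length := by
  cases paths with
  | nil => cases hp
  | cons q t =>
    have hq : pvMinLen (q :: t) = (t.map List.length).foldl min q.length := rfl
    rw [hq]
    rcases List.mem_cons.mp hp with rfl | hp
    · exact (foldl_min_le_nat _ _).1
    · exact (foldl_min_le_nat _ _).2 _ (List.mem_map_of_mem hp)

theorem le_pvMaxLen {paths : List (List (Int × Int))} {p : List (Int × Int)} (hp : p ∈ paths) :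
    p.length ≤ pvMaxLen paths := by
  have h : ∀ (t : List Nat) (a : Nat), a ≤ t.foldl max a ∧ ∀ y ∈ t, y ≤ t.foldl max a := by
    intro t
    induction t with
    | nil => simp
    | cons b t ih =>
      intro a
      refine ⟨le_trans (by omega) (ih (max a b)).1, ?_⟩
      intro y hy
      rcases List.mem_cons.mp hy with rfl | hy
      · exact le_trans (by omega) (ih (max a y)).1
      · exact (ih (max a b)).2 y hy
  exact (h (paths.map List.length) 0).2 _ (List.mem_map_of_mem hp)

theorem row_any_eq (h : List (Int × Int)) (t : List (List (Int × Int))) (i : Nat) :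
    ((pvRow (h :: t) i).any (fun l => l != (pvRow (h :: t) i).headD (0, 0))) =
      ((h :: t).any (fun p => p.getD i (0, 0) != h.getD i (0, 0))) := by
  simp [pvRow, List.any_map, Function.comp_def]

theorem row_any_false {s : List (List (Int × Int))} {j : Nat} (hne : s ≠ [])
    (h : pvAllEq s j) :
    ((pvRow s j).any (fun l => l != (pvRow s j).headD (0, 0))) = false := by
  cases s with
  | nil => cases hne rfl
  | cons a t =>
    rw [row_any_eq]
    simp only [List.any_eq_false]
    intro p hp
    simpa using h p hp a (by simp)

theorem go_none {s : List (List (Int × Int))} (hne : s ≠ [])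
    (h : ∀ j, j < pvMinLen s → pvAllEq s j) (fa : Nat) :
    prioritize_path_go fa s = none := by
  cases fa with
  | zero => rfl
  | succ fa =>
    have hfind : (List.range (pvMinLen s)).find?
        (fun ind => (pvRow s ind).any (fun l => l != (pvRow s ind).headD (0, 0))) = none := by
      rw [List.find?_eq_none]
      intro j hj
      simp only [Bool.not_eq_true]
      exact row_any_false hne (h j (List.mem_range.mp hj))
    conv_lhs => rw [prioritize_path_go]
    rw [hfind]

theorem main_eq (fb : Nat) : ∀ (s : List (List (Int × Int))) (i fa : Nat),
    s ≠ [] → s.length ≤ fa → (∀ p ∈ s, p.length ≤ fb + i) →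
    (∀ j, j < i → pvAllEq s j) →
    prioritize_path_go fa s = prioritize_path_alt_go s i fb := by
  induction fb with
  | zero =>
    intro s i fa hne hfa hlen hpre
    have hmi : pvMinLen s ≤ i := by
      cases s with
      | nil => cases hne rfl
      | cons a t => exact le_trans (pvMinLen_le List.mem_cons_self) (by simpa using hlen a List.mem_cons_self)
    rw [go_none hne (fun j hj => hpre j (by omega)) fa]
    rfl
  | succ fb ih =>
    intro s i fa hne hfa hlen hpre
    by_cases him : i < pvMinLen s
    · obtain ⟨a, t, rfl⟩ : ∃ a t, s = a :: t := by
        cases s with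
        | nil => cases hne rfl
        | cons a t => exact ⟨a, t, rfl⟩
      by_cases hdiv : ((a :: t).any (fun p => p.getD i (0, 0) != a.getD i (0, 0))) = true
      · -- divergent row at i
        have hfind : (List.range (pvMinLen (a :: t))).find?
            (fun ind => (pvRow (a :: t) ind).any (fun l => l != (pvRow (a :: t) ind).headD (0, 0))) = some i := by
          apply find?_range_eq_some him
          · rw [row_any_eq]; exact hdiv
          · intro j hj
            exact row_any_false (by simp) (hpre j hj)
        set optimal := (PySem.List.sorted2 (pvRow (a :: t) i) (fun a => a.2) (fun a => a.1)).headD (0, 0) with hoptdef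
        set s' := (a :: t).filter (fun p => p.getD i (0, 0) == optimal) with hs'def
        have hopt : optimal = (PySem.List.min2? (pvRow (a :: t) i) (fun a => a.2) (fun a => a.1)).getD (0, 0) := by
          rw [hoptdef, List.headD_eq_head?_getD, sorted2_head?_eq_min2?]
        have hcnt : (pvRow (a :: t) i).count optimal = s'.length := by
          rw [hs'def, pvRow]
          exact count_map_eq_length_filter _ optimal (a :: t)
        have hA : prioritize_path_go fa (a :: t) =
            (if (pvRow (a :: t) i).count optimal = 1 then s'.head?
             else prioritize_path_go (fa - 1) s') := by
          cases fa with
          | zero => simp at hfa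
          | succ fa =>
            conv_lhs => rw [prioritize_path_go]
            rw [hfind]
            rfl
        have hB : prioritize_path_alt_go (a :: t) i (fb + 1) =
            (if s'.length = 1 then s'.head?
             else prioritize_path_alt_go s' (i + 1) fb) := by
          conv_lhs => rw [prioritize_path_alt_go]
          rw [if_pos him]
          have hfirst : ((a :: t).headD []).getD i (0, 0) = a.getD i (0, 0) := rfl
          rw [hfirst, if_pos hdiv, ← hopt]
        rw [hA, hB, hcnt]
        by_cases hone : s'.length = 1
        · rw [if_pos hone, if_pos hone]
        · rw [if_neg hone, if_neg hone]
          -- membership of optimal in the row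
          have hoptmem : optimal ∈ pvRow (a :: t) i := by
            have hperm := PySem.List.sorted2_perm (pvRow (a :: t) i)
              (fun a : Int × Int => a.2) (fun a : Int × Int => a.1) false
            have hnil : PySem.List.sorted2 (pvRow (a :: t) i) (fun a => a.2) (fun a => a.1) ≠ [] := by
              intro hcontra
              have hl := hperm.length_eq
              rw [hcontra] at hl
              simp [pvRow] at hl
            obtain ⟨m, ms, hms⟩ := List.exists_cons_of_ne_nil hnil
            have hm : optimal = m := by rw [hoptdef, hms]; rfl
            rw [hm]
            exact hperm.mem_iff.mp (by rw [hms]; simp)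
          obtain ⟨p0, hp0, hfp0⟩ := List.mem_map.mp hoptmem
          have hs'ne : s' ≠ [] := by
            apply List.ne_nil_of_mem (a := p0)
            rw [hs'def]
            exact List.mem_filter.mpr ⟨hp0, by simpa using hfp0⟩
          -- a witness that not every row element is optimal
          obtain ⟨q0, hq0, hq0ne⟩ : ∃ q ∈ (a :: t), q.getD i (0, 0) ≠ a.getD i (0, 0) := by
            obtain ⟨q, hq, hqb⟩ := List.any_eq_true.mp hdiv
            exact ⟨q, hq, by simpa using hqb⟩
          have hwit : ∃ y ∈ pvRow (a :: t) i, y ≠ optimal := by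
            by_cases hoa : optimal = a.getD i (0, 0)
            · exact ⟨q0.getD i (0, 0), List.mem_map_of_mem hq0, by rw [hoa]; exact hq0ne⟩
            · exact ⟨a.getD i (0, 0), List.mem_map_of_mem (by simp), fun hcon => hoa hcon.symm⟩
          have hlt : s'.length < (a :: t).length := by
            rw [← hcnt]
            have hle : (pvRow (a :: t) i).count optimal ≤ (pvRow (a :: t) i).length :=
              List.count_le_length
            have hneq : (pvRow (a :: t) i).count optimal ≠ (pvRow (a :: t) i).length := by
              intro hcon
              obtain ⟨y, hy, hyne⟩ := hwit
              exact hyne (List.count_eq_length.mp hcon y hy).symm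
            have hrl : (pvRow (a :: t) i).length = (a :: t).length := by simp [pvRow]
            omega
          apply ih s' (i + 1) (fa - 1) hs'ne
          · omega
          · intro p hp
            have hps : p ∈ a :: t := (List.mem_filter.mp (hs'def ▸ hp)).1
            have := hlen p hps
            omega
          · intro j hj p hp q hq
            have hps := List.mem_filter.mp (hs'def ▸ hp)
            have hqs := List.mem_filter.mp (hs'def ▸ hq)
            rcases Nat.lt_or_ge j i with hji | hji
            · exact hpre j hji p hps.1 q hqs.1
            · have hjeq : j = i := by omega
              subst hjeq
              have h1 : p.getD j (0, 0) = optimal := by simpa using hps.2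
              have h2 : q.getD j (0, 0) = optimal := by simpa using hqs.2
              rw [h1, h2]
      · -- constant row at i: both sides step to i+1
        have hB : prioritize_path_alt_go (a :: t) i (fb + 1) =
            prioritize_path_alt_go (a :: t) (i + 1) fb := by
          conv_lhs => rw [prioritize_path_alt_go]
          rw [if_pos him]
          have hfirst : ((a :: t).headD []).getD i (0, 0) = a.getD i (0, 0) := rfl
          rw [hfirst, if_neg hdiv]
        rw [hB]
        apply ih (a :: t) (i + 1) fa (by simp) hfa
        · intro p hp
          have := hlen p hp
          omega
        · intro j hj
          rcases Nat.lt_or_ge j i with hji | hji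
          · exact hpre j hji
          · have hjeq : j = i := by omega
            subst hjeq
            intro p hp q hq
            have hall := List.any_eq_false.mp (Bool.not_eq_true _ ▸ hdiv)
            have h1 : p.getD j (0, 0) = a.getD j (0, 0) := by simpa using hall p hp
            have h2 : q.getD j (0, 0) = a.getD j (0, 0) := by simpa using hall q hq
            rw [h1, h2]
    · have hBn : prioritize_path_alt_go s i (fb + 1) = none := by
        rw [prioritize_path_alt_go, if_neg him]
      rw [hBn]
      exact go_none hne (fun j hj => hpre j (by omega)) fa

theorem prioritize_path_eq_alt (paths : List (List (Int × Int))) :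
    prioritize_path paths = prioritize_path_alt paths := by
  by_cases hnil : paths = []
  · subst hnil; rfl
  · rw [prioritize_path, prioritize_path_alt, if_neg hnil]
    exact main_eq (pvMaxLen paths) paths 0 paths.length hnil le_rfl
      (fun p hp => by simpa using le_pvMaxLen hp) (fun j hj => absurd hj (by omega))

-- ===== VERDICT (by name: the statement is the Claim_ definition above) =====
theorem prioritize_path_spec : Claim_equal_prioritize_path := by
  intro paths _
  unfold Spec_prioritize_path
  exact prioritize_path_eq_alt paths
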